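-- pv_equiv track=rewrite | github.com/MAPMG79/Altium2KiCAD_db | migration_tool/core/mapping_engine.py | _get_fallback_symbol
-- ===== SOURCE A (Python) =====
-- from typing import Dict, List, Any, Optional, Tuple, Union
--
-- def _get_fallback_symbol(component_data: Dict[str, Any]) -> str:
--     """
--     Get fallback symbol when no good match is found.
--
--     Args:
--         component_data: Component data dictionary
--
--     Returns:
--         KiCAD symbol name
--     """
--     # Use basic heuristics for fallback
--     description = component_data.get('Description', '').lower()
--     value = component_data.get('Value', '').lower()
--
--     # Check for basic component indicators
--     if any(term in f"{description} {value}" for term in ['ohm', 'k', 'm', 'resistor']):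
--         return 'Device:R'
--     elif any(term in f"{description} {value}" for term in ['f', 'farad', 'capacitor']):
--         return 'Device:C'
--     elif any(term in f"{description} {value}" for term in ['h', 'henry', 'inductor']):
--         return 'Device:L'
--     elif any(term in f"{description} {value}" for term in ['diode', 'rectifier']):
--         return 'Device:D'
--     elif any(term in f"{description} {value}" for term in ['transistor', 'fet', 'mosfet']):
--         return 'Device:Q_NMOS_GSD'
--     else:
--         return 'Device:U'  # Ultimate fallback
-- ===== SOURCE B (Python) =====
-- # Priority-min aggregation: one flat term->priority map, take the minimum priority
-- # among all matching terms (no rule groups, no early-exit cascade).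
-- SYMBOLS = ['Device:R', 'Device:C', 'Device:L', 'Device:D', 'Device:Q_NMOS_GSD', 'Device:U']
-- TERM_PRIORITY = {
--     'ohm': 0, 'k': 0, 'm': 0, 'resistor': 0,
--     'f': 1, 'farad': 1, 'capacitor': 1,
--     'h': 2, 'henry': 2, 'inductor': 2,
--     'diode': 3, 'rectifier': 3,
--     'transistor': 4, 'fet': 4, 'mosfet': 4,
-- }
--
--
-- def _get_fallback_symbol(component_data):
--     haystack = f"{component_data.get('Description', '').lower()} {component_data.get('Value', '').lower()}"
--     best = min((prio for term, prio in TERM_PRIORITY.items() if term in haystack),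
--                default=len(SYMBOLS) - 1)
--     return SYMBOLS[best]
-- ===== Notes on version B (the rewrite author's own statement) =====
-- stated objective: alternative
-- what changed: Replaces the if/elif cascade of grouped any-substring tests (haystack rebuilt per branch) with a flat term-to-priority map aggregated by a single min over all matching terms, indexing a symbol table with the best priority.
import Mathlib
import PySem

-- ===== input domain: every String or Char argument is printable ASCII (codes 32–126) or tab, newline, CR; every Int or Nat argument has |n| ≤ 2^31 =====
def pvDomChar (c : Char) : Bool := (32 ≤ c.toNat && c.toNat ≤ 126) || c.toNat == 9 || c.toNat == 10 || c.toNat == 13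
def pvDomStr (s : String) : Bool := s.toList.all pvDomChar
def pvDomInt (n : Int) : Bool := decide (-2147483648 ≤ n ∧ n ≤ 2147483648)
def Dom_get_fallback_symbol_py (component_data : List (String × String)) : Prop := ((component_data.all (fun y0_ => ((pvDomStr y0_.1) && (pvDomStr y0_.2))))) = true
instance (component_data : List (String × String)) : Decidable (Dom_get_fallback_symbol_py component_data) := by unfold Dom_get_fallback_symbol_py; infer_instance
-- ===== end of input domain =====

-- B replaces A's grouped if/elif cascade by a flat term→priority map aggregated with a single
-- min over all matching terms, indexing a symbol table (objective: alternative).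

-- dict.get(k, '') on the association list (lookup = first match, per the type convention); exact for string keys
def pyGetStr (d : List (String × String)) (k dflt : String) : String :=
  match d.find? (fun p => p.1 == k) with
  | some p => p.2
  | none => dflt

-- ===== PORT A =====
-- literal transliteration of A: the if/elif chain, rebuilding the f-string haystack in every branch
def get_fallback_symbol_py (component_data : List (String × String)) : String :=
  let description := PySem.Str.lower (pyGetStr component_data "Description" "")
  let value := PySem.Str.lower (pyGetStr component_data "Value" "")
  if ["ohm", "k", "m", "resistor"].any (fun term => PySem.Str.isIn term (PySem.Str.join " " [description, value])) then
    "Device:R"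
  else if ["f", "farad", "capacitor"].any (fun term => PySem.Str.isIn term (PySem.Str.join " " [description, value])) then
    "Device:C"
  else if ["h", "henry", "inductor"].any (fun term => PySem.Str.isIn term (PySem.Str.join " " [description, value])) then
    "Device:L"
  else if ["diode", "rectifier"].any (fun term => PySem.Str.isIn term (PySem.Str.join " " [description, value])) then
    "Device:D"
  else if ["transistor", "fet", "mosfet"].any (fun term => PySem.Str.isIn term (PySem.Str.join " " [description, value])) then
    "Device:Q_NMOS_GSD"
  else
    "Device:U"

-- ===== PORT B =====
-- SYMBOLS table of Source B
def pvSymbols : List String :=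
  ["Device:R", "Device:C", "Device:L", "Device:D", "Device:Q_NMOS_GSD", "Device:U"]

-- TERM_PRIORITY of Source B, in insertion order
def pvTermPriority : List (String × Nat) :=
  [("ohm", 0), ("k", 0), ("m", 0), ("resistor", 0),
   ("f", 1), ("farad", 1), ("capacitor", 1),
   ("h", 2), ("henry", 2), ("inductor", 2),
   ("diode", 3), ("rectifier", 3),
   ("transistor", 4), ("fet", 4), ("mosfet", 4)]

-- literal transliteration of B: haystack once; min priority over matching terms
-- (min(gen, default=5) ported as a foldl with accumulator starting at the default);
-- SYMBOLS[best] ported with getD, exact since best ≤ 5 = len(SYMBOLS)-1 always.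
def get_fallback_symbol_py_alt (component_data : List (String × String)) : String :=
  let haystack := PySem.Str.join " "
    [PySem.Str.lower (pyGetStr component_data "Description" ""),
     PySem.Str.lower (pyGetStr component_data "Value" "")]
  let best := pvTermPriority.foldl
    (fun acc tp => if PySem.Str.isIn tp.1 haystack then min acc tp.2 else acc)
    (pvSymbols.length - 1)
  pvSymbols.getD best "Device:U"

-- ===== PRECONDITION & SPEC =====
def Spec_get_fallback_symbol_py (component_data : List (String × String)) (out : String) : Prop := out = get_fallback_symbol_py_alt component_data
instance (component_data : List (String × String)) (out : String) : Decidable (Spec_get_fallback_symbol_py component_data out) := by unfold Spec_get_fallback_symbol_py; infer_instance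

-- ===== CLAIM (what is proved, stated in full; the proofs are below) =====
def Claim_equal_get_fallback_symbol_py : Prop := ∀ (component_data : List (String × String)), Dom_get_fallback_symbol_py component_data → Spec_get_fallback_symbol_py component_data (get_fallback_symbol_py component_data)

-- ===== LEMMAS AND PROOFS =====

-- folding B's min-update over a block of terms that all carry the same priority
theorem foldl_const_prio (m : String → Bool) (p : Nat) (acc : Nat) (ts : List String) :
    List.foldl (fun acc tp => if m tp.1 then min acc tp.2 else acc) acc
      (ts.map (fun t => (t, p)))
    = if ts.any m then min acc p else acc := by
  induction ts generalizing acc with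
  | nil => simp
  | cons t ts ih =>
    cases h : m t <;> simp [h, ih]

-- B's fold over the flat term table yields the first matching group's priority
theorem foldB (m : String → Bool) :
    List.foldl (fun acc tp => if m tp.1 then min acc tp.2 else acc) 5 pvTermPriority
    = if ["ohm", "k", "m", "resistor"].any m then 0
      else if ["f", "farad", "capacitor"].any m then 1
      else if ["h", "henry", "inductor"].any m then 2
      else if ["diode", "rectifier"].any m then 3
      else if ["transistor", "fet", "mosfet"].any m then 4
      else 5 := by
  have hsplit : pvTermPriority
      = (["ohm", "k", "m", "resistor"].map (fun t => (t, 0)))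
        ++ (["f", "farad", "capacitor"].map (fun t => (t, 1)))
        ++ (["h", "henry", "inductor"].map (fun t => (t, 2)))
        ++ (["diode", "rectifier"].map (fun t => (t, 3)))
        ++ (["transistor", "fet", "mosfet"].map (fun t => (t, 4))) := rfl
  rw [hsplit]
  simp only [List.foldl_append, foldl_const_prio]
  cases h1 : ["ohm", "k", "m", "resistor"].any m <;>
    cases h2 : ["f", "farad", "capacitor"].any m <;>
      cases h3 : ["h", "henry", "inductor"].any m <;>
        cases h4 : ["diode", "rectifier"].any m <;>
          cases h5 : ["transistor", "fet", "mosfet"].any m <;> simp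

-- ===== VERDICT (by name: the statement is the Claim_ definition above) =====
theorem get_fallback_symbol_py_spec : Claim_equal_get_fallback_symbol_py := by
  intro component_data _
  unfold Spec_get_fallback_symbol_py
  simp only [get_fallback_symbol_py, get_fallback_symbol_py_alt]
  rw [show pvSymbols.length - 1 = 5 from rfl,
    foldB (fun term => PySem.Str.isIn term
      (PySem.Str.join " "
        [PySem.Str.lower (pyGetStr component_data "Description" ""),
         PySem.Str.lower (pyGetStr component_data "Value" "")]))]
  split_ifs <;> rfl
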